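-- pv_equiv track=rewrite | github.com/ntmphu/DBSCAN_V2 | Correlated data/util.py | find_intersection_of_all_unions
-- ===== SOURCE A (Python) =====
-- def intersection_of_two_intervals(interval1, interval2):
--     # Intersection giữa hai interval đơn lẻ
--     start = max(interval1[0], interval2[0])
--     end = min(interval1[1], interval2[1])
--     if start < end:
--         return (start, end)
--     return None  # Không có phần giao
--
-- def intersection_of_union_and_interval(union, interval):
--     # Intersection giữa union (có thể gồm nhiều interval) và một interval đơn lẻ
--     result = []
--     for u_interval in union:
--         intersect = intersection_of_two_intervals(u_interval, interval)
--         if intersect: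
--             result.append(intersect)
--     return result
--
-- def find_intersection_of_all_unions(union_list):
--     # Bắt đầu với union đầu tiên
--     intersection = union_list[0]
--
--     # Lặp qua từng union tiếp theo và tính phần giao
--     for union in union_list[1:]:
--         new_intersection = []
--         for interval in intersection:
--             # Tính intersection giữa mỗi interval trong union và interval trong intersection hiện tại
--             new_intersection += intersection_of_union_and_interval(union, interval)
--         intersection = new_intersection
--
--     return intersection
-- ===== SOURCE B (Python) =====
-- def find_intersection_of_all_unions(union_list):
--     # Depth-first search over one interval per union, keeping only the running
--     # (lo, hi) intersection; no intermediate level lists are built.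
--     rest = union_list[1:]
--
--     def dfs(k, lo, hi):
--         if k == len(rest):
--             return [(lo, hi)]
--         out = []
--         for a, b in rest[k]:
--             nlo = max(lo, a)
--             nhi = min(hi, b)
--             if nlo < nhi:
--                 out += dfs(k + 1, nlo, nhi)
--         return out
--
--     result = []
--     for lo, hi in union_list[0]:
--         result += dfs(0, lo, hi)
--     return result
-- ===== Notes on version B (the rewrite author's own statement) =====
-- stated objective: alternative
-- what changed: Replaces the level-by-level rebuild of whole intersection lists with a depth-first recursion that carries a single running (lo,hi) interval down the list of unions, emitting results directly without intermediate per-level lists.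
import Mathlib
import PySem

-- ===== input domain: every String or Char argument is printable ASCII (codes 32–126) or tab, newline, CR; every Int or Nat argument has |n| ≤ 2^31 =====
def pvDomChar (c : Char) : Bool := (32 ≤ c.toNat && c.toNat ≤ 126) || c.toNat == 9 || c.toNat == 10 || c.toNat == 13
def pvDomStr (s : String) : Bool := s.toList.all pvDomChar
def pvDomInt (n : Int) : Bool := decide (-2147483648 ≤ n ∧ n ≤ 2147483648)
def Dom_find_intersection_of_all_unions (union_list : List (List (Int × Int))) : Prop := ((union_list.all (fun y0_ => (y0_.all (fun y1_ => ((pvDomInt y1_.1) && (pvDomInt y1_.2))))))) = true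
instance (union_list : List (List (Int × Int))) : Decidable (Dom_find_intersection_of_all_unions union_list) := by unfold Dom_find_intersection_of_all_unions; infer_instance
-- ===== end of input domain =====

-- B replaces A's level-by-level rebuild of whole intersection lists by a depth-first
-- recursion carrying one running (lo, hi) interval; alternative structure, same cost.

-- ===== PORT A =====
def intersection_of_two_intervals (interval1 interval2 : Int × Int) : Option (Int × Int) :=
  let start := max interval1.1 interval2.1
  let stop := min interval1.2 interval2.2
  if start < stop then some (start, stop) else none

def intersection_of_union_and_interval (union : List (Int × Int)) (interval : Int × Int) : List (Int × Int) :=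
  union.foldl (fun result u_interval =>
    match intersection_of_two_intervals u_interval interval with
    | some intersect => result ++ [intersect]
    | none => result) []

def find_intersection_of_all_unions (union_list : List (List (Int × Int))) : List (Int × Int) :=
  match union_list with
  | [] => []  -- Python raises IndexError on []; excluded by Pre_
  | first :: rest =>
    rest.foldl (fun intersection union =>
      intersection.foldl
        (fun new_intersection interval =>
          new_intersection ++ intersection_of_union_and_interval union interval) []) first

-- ===== PORT B =====
def pvDfs (rest : List (List (Int × Int))) (lo hi : Int) : List (Int × Int) :=
  match rest with
  | [] => [(lo, hi)]
  | u :: rs =>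
    u.foldl (fun out p =>
      let nlo := max lo p.1
      let nhi := min hi p.2
      if nlo < nhi then out ++ pvDfs rs nlo nhi else out) []

def find_intersection_of_all_unions_alt (union_list : List (List (Int × Int))) : List (Int × Int) :=
  match union_list with
  | [] => []
  | first :: rest =>
    first.foldl (fun result p => result ++ pvDfs rest p.1 p.2) []

-- ===== PRECONDITION & SPEC =====
-- Python A evaluates union_list[0] and raises IndexError on the empty list; Pre_ excludes exactly that input.
def Pre_find_intersection_of_all_unions (union_list : List (List (Int × Int))) : Prop := union_list ≠ []
instance (union_list : List (List (Int × Int))) : Decidable (Pre_find_intersection_of_all_unions union_list) := by unfold Pre_find_intersection_of_all_unions; infer_instance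
def pvWitness_find_intersection_of_all_unions : (List (List (Int × Int))) := [[(0, 1)]]

def Spec_find_intersection_of_all_unions (union_list : List (List (Int × Int))) (out : List (Int × Int)) : Prop := out = find_intersection_of_all_unions_alt union_list
instance (union_list : List (List (Int × Int))) (out : List (Int × Int)) : Decidable (Spec_find_intersection_of_all_unions union_list out) := by unfold Spec_find_intersection_of_all_unions; infer_instance

-- ===== CLAIM (what is proved, stated in full; the proofs are below) =====
def Claim_equal_find_intersection_of_all_unions : Prop := ∀ (union_list : List (List (Int × Int))), Dom_find_intersection_of_all_unions union_list → Pre_find_intersection_of_all_unions union_list → Spec_find_intersection_of_all_unions union_list (find_intersection_of_all_unions union_list)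

-- ===== LEMMAS AND PROOFS =====

-- A's inner helper as a flatMap.
theorem iou_eq_flatMap (u : List (Int × Int)) (iv : Int × Int) :
    intersection_of_union_and_interval u iv
      = u.flatMap (fun q => match intersection_of_two_intervals q iv with
          | some x => [x]
          | none => []) := by
  unfold intersection_of_union_and_interval
  rw [show (fun (result : List (Int × Int)) u_interval =>
        match intersection_of_two_intervals u_interval iv with
        | some intersect => result ++ [intersect]
        | none => result)
      = (fun result u_interval => result ++
          match intersection_of_two_intervals u_interval iv with
          | some x => [x]
          | none => []) from by
        funext r q; cases intersection_of_two_intervals q iv <;> simp]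
  rw [PySem.List.foldl_append_eq_flatMap]
  simp

-- B's recursion, one layer, as a flatMap.
theorem pvDfs_cons (u : List (Int × Int)) (rs : List (List (Int × Int))) (lo hi : Int) :
    pvDfs (u :: rs) lo hi
      = u.flatMap (fun q =>
          if max lo q.1 < min hi q.2 then pvDfs rs (max lo q.1) (min hi q.2) else []) := by
  show u.foldl _ [] = _
  rw [show (fun (out : List (Int × Int)) (p : Int × Int) =>
        let nlo := max lo p.1
        let nhi := min hi p.2
        if nlo < nhi then out ++ pvDfs rs nlo nhi else out)
      = (fun out p => out ++
          if max lo p.1 < min hi p.2 then pvDfs rs (max lo p.1) (min hi p.2) else []) from by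
        funext r q; by_cases h : max lo q.1 < min hi q.2 <;> simp [h]]
  rw [PySem.List.foldl_append_eq_flatMap]
  simp

-- pointwise bridge between one A-step on an interval and one B-layer
theorem step_eq (u : List (Int × Int)) (rs : List (List (Int × Int))) (iv : Int × Int) :
    (intersection_of_union_and_interval u iv).flatMap (fun p => pvDfs rs p.1 p.2)
      = pvDfs (u :: rs) iv.1 iv.2 := by
  rw [iou_eq_flatMap, pvDfs_cons, List.flatMap_assoc]
  apply List.flatMap_congr
  intro q _
  unfold intersection_of_two_intervals
  by_cases h : max q.1 iv.1 < min q.2 iv.2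
  · simp [h, max_comm iv.1 q.1, min_comm iv.2 q.2]
  · simp [h, max_comm iv.1 q.1, min_comm iv.2 q.2]

-- main invariant: A's remaining level loop equals a flatMap of B's dfs
theorem main_eq (rest : List (List (Int × Int))) (cur : List (Int × Int)) :
    rest.foldl (fun intersection union =>
        intersection.foldl
          (fun new_intersection interval =>
            new_intersection ++ intersection_of_union_and_interval union interval) []) cur
      = cur.flatMap (fun p => pvDfs rest p.1 p.2) := by
  induction rest generalizing cur with
  | nil => simp [pvDfs]
  | cons u rs ih =>
    rw [List.foldl_cons, ih, PySem.List.foldl_append_eq_flatMap, List.nil_append,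
      List.flatMap_assoc]
    apply List.flatMap_congr
    intro iv _
    exact step_eq u rs iv

-- ===== VERDICT (by name: the statement is the Claim_ definition above) =====
theorem find_intersection_of_all_unions_spec : Claim_equal_find_intersection_of_all_unions := by
  intro union_list _ hpre
  unfold Spec_find_intersection_of_all_unions
  cases union_list with
  | nil => exact absurd rfl hpre
  | cons first rest =>
    show rest.foldl _ first = _
    rw [main_eq]
    show _ = first.foldl _ []
    rw [PySem.List.foldl_append_eq_flatMap, List.nil_append]
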